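-- pv_equiv track=rewrite | github.com/Seth-Lamancusa/to_do | validation.py | routine_attribute_values_compatible
-- ===== SOURCE A (Python) =====
-- VALID_FREQUENCIES = ["day", "week", "month", "year"]
--
-- def routine_attribute_values_compatible(rschedule, frequency):
--     """
--     Parameters:
--         rschedule (list): rschedule to validate
--         frequency (str): frequency to validate
--
--     Returns:
--         bool: True if rschedule is compatible with frequency, False otherwise
--     """
--
--     if not is_valid_rschedule(rschedule):
--         return False
--     if not is_valid_frequency(frequency):
--         return False
--
--     if frequency == "day":
--         return all([spec[0] == 0 for spec in rschedule])
--     elif frequency == "week":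
--         return all([spec[0] in {0, 1, 2, 3, 4, 5, 6} for spec in rschedule])
--     elif frequency == "month":
--         return all([spec[0] in range(0, 28) for spec in rschedule])
--     elif frequency == "year":
--         return all([spec[0] in range(0, 365) for spec in rschedule])
--     else:
--         return False
--
-- def is_valid_rschedule(rschedule):
--     """
--     Parameters:
--         rschedule (list): rschedule to validate
--
--     Returns:
--         bool: True if rschedule is valid in isolation, False otherwise
--
--     Raises:
--         ValueError: if frequency is not valid
--     """
--
--     if not isinstance(rschedule, list):
--         return False
--
--     for spec in rschedule:
--         if not (
--             isinstance(spec, list)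
--             and len(spec) == 2
--             and isinstance(spec[0], int)
--             and isinstance(spec[1], int)
--             and 0 <= spec[1] <= 24 * 60
--         ):
--             return False
--
--     return True
--
-- def is_valid_frequency(frequency):
--     """
--     Parameters:
--         frequency (str): frequency to validate
--
--     Returns:
--         bool: True if frequency is valid, False otherwise
--     """
--
--     return frequency in VALID_FREQUENCIES
-- ===== SOURCE B (Python) =====
-- def routine_attribute_values_compatible(rschedule, frequency):
--     limits = {"day": 1, "week": 7, "month": 28, "year": 365}
--     limit = limits.get(frequency)
--     if limit is None or not isinstance(rschedule, list):
--         return False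
--     for spec in rschedule:
--         if not (
--             isinstance(spec, list)
--             and len(spec) == 2
--             and isinstance(spec[0], int)
--             and isinstance(spec[1], int)
--             and 0 <= spec[1] <= 1440
--             and 0 <= spec[0] < limit
--         ):
--             return False
--     return True
-- ===== Notes on version B (the rewrite author's own statement) =====
-- stated objective: simpler
-- what changed: B replaces A's two separate passes (is_valid_rschedule's validation loop plus a frequency-specific all() bound pass chosen by a four-branch if/elif cascade) with one threshold lookup in a bounds dict and a single fused loop that checks each spec's structure and its day-value bound together, returning on the first violation.
import Mathlib
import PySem

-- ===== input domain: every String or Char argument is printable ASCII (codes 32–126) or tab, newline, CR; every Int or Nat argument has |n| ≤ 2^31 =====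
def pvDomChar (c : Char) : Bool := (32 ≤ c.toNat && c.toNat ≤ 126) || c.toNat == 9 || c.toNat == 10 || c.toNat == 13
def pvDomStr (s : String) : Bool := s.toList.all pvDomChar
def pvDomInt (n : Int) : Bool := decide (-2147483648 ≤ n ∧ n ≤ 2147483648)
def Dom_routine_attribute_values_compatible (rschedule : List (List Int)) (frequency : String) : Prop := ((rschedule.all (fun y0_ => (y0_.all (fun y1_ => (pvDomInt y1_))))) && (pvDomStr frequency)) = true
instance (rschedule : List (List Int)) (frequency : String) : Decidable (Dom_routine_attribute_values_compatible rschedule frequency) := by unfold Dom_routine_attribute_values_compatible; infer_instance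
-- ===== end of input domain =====

-- B fuses A's two passes (structure validation + frequency-specific bound check) into one
-- loop driven by a threshold looked up in a bounds dict; same return value, different decomposition.

-- ===== PORT A =====
-- is_valid_rschedule: loop with early 'return False'. Under the type List (List Int) the
-- isinstance checks are always true; spec[1] is only read when len(spec) == 2, matched structurally.
def pvA_isValidRschedule : List (List Int) → Bool
  | [] => true
  | spec :: rest =>
    match spec with
    | [_, b] => if 0 ≤ b ∧ b ≤ 1440 then pvA_isValidRschedule rest else false
    | _ => false

-- spec[0]: A only evaluates it after is_valid_rschedule guaranteed len(spec) == 2, so the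
-- index is always in range; pyGet? is exact there and the default is never used.
def pvA_first (spec : List Int) : Int := (PySem.List.pyGet? spec 0).getD 0

def routine_attribute_values_compatible (rschedule : List (List Int)) (frequency : String) : Bool :=
  if ¬ (pvA_isValidRschedule rschedule = true) then false
  else if ¬ (["day", "week", "month", "year"].contains frequency = true) then false
  else if frequency = "day" then rschedule.all (fun spec => pvA_first spec == 0)
  else if frequency = "week" then
    rschedule.all (fun spec => ([0, 1, 2, 3, 4, 5, 6] : List Int).contains (pvA_first spec))
  else if frequency = "month" then
    rschedule.all (fun spec => (PySem.List.pyRange 0 28 1).contains (pvA_first spec))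
  else if frequency = "year" then
    rschedule.all (fun spec => (PySem.List.pyRange 0 365 1).contains (pvA_first spec))
  else false

-- ===== PORT B =====
def pvB_limits : PySem.Dict String Int :=
  PySem.Dict.ofList [("day", 1), ("week", 7), ("month", 28), ("year", 365)]

def pvB_loop (limit : Int) : List (List Int) → Bool
  | [] => true
  | spec :: rest =>
    match spec with
    | [a, b] => if 0 ≤ b ∧ b ≤ 1440 ∧ 0 ≤ a ∧ a < limit then pvB_loop limit rest else false
    | _ => false

def routine_attribute_values_compatible_alt (rschedule : List (List Int)) (frequency : String) : Bool :=
  match pvB_limits.get? frequency with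
  | none => false
  | some limit => pvB_loop limit rschedule

-- ===== PRECONDITION & SPEC =====
def Spec_routine_attribute_values_compatible (rschedule : List (List Int)) (frequency : String) (out : Bool) : Prop := out = routine_attribute_values_compatible_alt rschedule frequency
instance (rschedule : List (List Int)) (frequency : String) (out : Bool) : Decidable (Spec_routine_attribute_values_compatible rschedule frequency out) := by unfold Spec_routine_attribute_values_compatible; infer_instance

-- ===== CLAIM (what is proved, stated in full; the proofs are below) =====
def Claim_equal_routine_attribute_values_compatible : Prop := ∀ (rschedule : List (List Int)) (frequency : String), Dom_routine_attribute_values_compatible rschedule frequency → Spec_routine_attribute_values_compatible rschedule frequency (routine_attribute_values_compatible rschedule frequency)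

-- ===== LEMMAS AND PROOFS =====

-- A's validity pass combined with its bound pass for threshold `limit` equals B's fused loop.
theorem pv_combine (limit : Int) (p : Int → Bool)
    (hp : ∀ x, p x = decide (0 ≤ x ∧ x < limit)) :
    ∀ rs : List (List Int),
      (pvA_isValidRschedule rs && rs.all (fun spec => p (pvA_first spec))) = pvB_loop limit rs := by
  intro rs
  induction rs with
  | nil => simp [pvA_isValidRschedule, pvB_loop]
  | cons spec rest ih =>
    match spec with
    | [] => simp [pvA_isValidRschedule, pvB_loop]
    | [_] => simp [pvA_isValidRschedule, pvB_loop]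
    | a :: b :: _ :: _ => simp [pvA_isValidRschedule, pvB_loop]
    | [a, b] =>
      have hfst : pvA_first [a, b] = a := rfl
      simp only [pvA_isValidRschedule, pvB_loop, List.all_cons, hfst]
      rw [hp a]
      by_cases h1 : 0 ≤ b ∧ b ≤ 1440
      · by_cases h2 : 0 ≤ a ∧ a < limit
        · rw [if_pos h1, if_pos ⟨h1.1, h1.2, h2.1, h2.2⟩, ← ih]
          simp [h2]
        · rw [if_pos h1, if_neg (by tauto)]
          simp [h2]
      · rw [if_neg h1, if_neg (by tauto)]
        simp

theorem pv_day (rs : List (List Int)) :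
    routine_attribute_values_compatible rs "day" = pvB_loop 1 rs := by
  rw [← pv_combine 1 (fun x => x == 0) (by intro x; rw [Bool.eq_iff_iff]; simp only [beq_iff_eq, decide_eq_true_eq]; omega)]
  simp [routine_attribute_values_compatible]

theorem pv_week (rs : List (List Int)) :
    routine_attribute_values_compatible rs "week" = pvB_loop 7 rs := by
  rw [← pv_combine 7 (fun x => ([0, 1, 2, 3, 4, 5, 6] : List Int).contains x)
    (by
      intro x
      rw [Bool.eq_iff_iff]
      simp only [List.contains_iff_mem, List.mem_cons, List.not_mem_nil, or_false, decide_eq_true_eq]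
      omega)]
  simp [routine_attribute_values_compatible]

theorem pv_month (rs : List (List Int)) :
    routine_attribute_values_compatible rs "month" = pvB_loop 28 rs := by
  rw [← pv_combine 28 (fun x => (PySem.List.pyRange 0 28 1).contains x)
    (by
      intro x
      rw [Bool.eq_iff_iff]
      simp only [List.contains_iff_mem, PySem.List.mem_pyRange_one, decide_eq_true_eq])]
  simp [routine_attribute_values_compatible]

theorem pv_year (rs : List (List Int)) :
    routine_attribute_values_compatible rs "year" = pvB_loop 365 rs := by
  rw [← pv_combine 365 (fun x => (PySem.List.pyRange 0 365 1).contains x)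
    (by
      intro x
      rw [Bool.eq_iff_iff]
      simp only [List.contains_iff_mem, PySem.List.mem_pyRange_one, decide_eq_true_eq])]
  simp [routine_attribute_values_compatible]

-- ===== VERDICT (by name: the statement is the Claim_ definition above) =====
theorem routine_attribute_values_compatible_spec : Claim_equal_routine_attribute_values_compatible := by
  intro rs f _
  show routine_attribute_values_compatible rs f = routine_attribute_values_compatible_alt rs f
  by_cases hd : f = "day"
  · subst hd; rw [pv_day]; rfl
  by_cases hw : f = "week"
  · subst hw; rw [pv_week]; rfl
  by_cases hm : f = "month"
  · subst hm; rw [pv_month]; rfl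
  by_cases hy : f = "year"
  · subst hy; rw [pv_year]; rfl
  · have hmk : pvB_limits = PySem.Dict.mk [("day", 1), ("week", 7), ("month", 28), ("year", 365)] := rfl
    have hg : pvB_limits.get? f = none := by
      rw [hmk]
      simp [PySem.Dict.get?, beq_iff_eq, Ne.symm hd, Ne.symm hw,
        Ne.symm hm, Ne.symm hy]
    have hc : (["day", "week", "month", "year"].contains f) = false := by
      simp [hd, hw, hm, hy]
    simp only [routine_attribute_values_compatible, routine_attribute_values_compatible_alt, hg, hc]
    simp
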